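-- pv_equiv track=rewrite | github.com/dcschenc/myleetcode | 1132-before-and-after-puzzle/1132-before-and-after-puzzle.py | beforeAndAfterPuzzles
-- ===== SOURCE A (Python) =====
-- from typing import List
--
-- from collections import defaultdict
--
-- def beforeAndAfterPuzzles(phrases: List[str]) -> List[str]:
--     prefix_map = defaultdict(list)
--     suffix_map = defaultdict(list)
--
--     for i, phrase in enumerate(phrases):
--         words = phrase.split()
--         prefix_map[words[0]].append(i)
--         suffix_map[words[-1]].append(i)
--
--     result = set()
--
--     for i, phrase in enumerate(phrases):
--         words = phrase.split()
--         prefix_candidates = suffix_map[words[0]]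
--         suffix_candidates = prefix_map[words[-1]]
--
--         for j in prefix_candidates:
--             if j != i:
--                 result.add(phrases[j] + phrase[len(words[0]):])
--
--         for k in suffix_candidates:
--             if k != i:
--                 result.add(phrase + phrases[k][len(words[-1]):])
--
--     return sorted(list(result))
-- ===== SOURCE B (Python) =====
-- def beforeAndAfterPuzzles(phrases):
--     n = len(phrases)
--     result = set()
--     for i in range(n):
--         wi = phrases[i].split()
--         for j in range(n):
--             if i == j:
--                 continue
--             wj = phrases[j].split()
--             if wi[-1] == wj[0]:
--                 result.add(phrases[i] + phrases[j][len(wj[0]):])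
--     return sorted(result)
-- ===== Notes on version B (the rewrite author's own statement) =====
-- stated objective: simpler
-- what changed: B drops A's prefix/suffix index maps and the bucket walks entirely: it scans all ordered pairs (i, j), compares the last word of phrases[i] with the first word of phrases[j], and collects phrases[i] + phrases[j] minus its first word into a set, then sorts.
import Mathlib
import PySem

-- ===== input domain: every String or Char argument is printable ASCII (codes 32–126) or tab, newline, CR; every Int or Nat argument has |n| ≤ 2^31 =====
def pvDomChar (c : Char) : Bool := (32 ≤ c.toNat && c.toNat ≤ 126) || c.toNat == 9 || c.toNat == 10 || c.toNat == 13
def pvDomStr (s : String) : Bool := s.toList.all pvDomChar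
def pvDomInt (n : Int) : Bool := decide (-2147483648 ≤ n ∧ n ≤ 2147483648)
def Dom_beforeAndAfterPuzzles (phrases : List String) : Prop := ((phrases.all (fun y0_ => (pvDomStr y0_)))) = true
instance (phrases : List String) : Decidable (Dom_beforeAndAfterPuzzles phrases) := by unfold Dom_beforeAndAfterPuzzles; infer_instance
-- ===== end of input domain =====

-- B replaces A's prefix/suffix index maps by a direct scan over all ordered pairs (i, j),
-- comparing the last word of phrases[i] with the first word of phrases[j] — simpler, no maps.

-- ===== PORT A =====
def beforeAndAfterPuzzles (phrases : List String) : List String :=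
  let maps :=
    (PySem.List.enumerate phrases).foldl
      (fun (m : PySem.Dict String (List Int) × PySem.Dict String (List Int)) p =>
        let words := PySem.Str.split₀ p.2
        (PySem.Dict.modify m.1 (PySem.List.pyGetD words 0 "") [] (fun l => l ++ [p.1]),
         PySem.Dict.modify m.2 (PySem.List.pyGetD words (-1) "") [] (fun l => l ++ [p.1])))
      (PySem.Dict.empty, PySem.Dict.empty)
  let result :=
    (PySem.List.enumerate phrases).foldl
      (fun (r : PySem.Set String) p =>
        let words := PySem.Str.split₀ p.2
        let prefixCandidates := PySem.Dict.getD maps.2 (PySem.List.pyGetD words 0 "") []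
        let suffixCandidates := PySem.Dict.getD maps.1 (PySem.List.pyGetD words (-1) "") []
        let r1 := prefixCandidates.foldl
          (fun r j => if j ≠ p.1 then
              PySem.Set.add r (PySem.List.pyGetD phrases j "" ++
                PySem.Str.slice p.2 (some ((PySem.Str.len (PySem.List.pyGetD words 0 "") : Int))) none)
            else r) r
        suffixCandidates.foldl
          (fun r k => if k ≠ p.1 then
              PySem.Set.add r (p.2 ++
                PySem.Str.slice (PySem.List.pyGetD phrases k "") (some ((PySem.Str.len (PySem.List.pyGetD words (-1) "") : Int))) none)
            else r) r1)
      PySem.Set.empty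
  PySem.List.sorted result (fun x => x) false

-- ===== PORT B =====
def beforeAndAfterPuzzles_alt (phrases : List String) : List String :=
  let n : Int := phrases.length
  let result :=
    (PySem.List.pyRange 0 n 1).foldl
      (fun (r : PySem.Set String) i =>
        let wi := PySem.Str.split₀ (PySem.List.pyGetD phrases i "")
        (PySem.List.pyRange 0 n 1).foldl
          (fun r j =>
            if i = j then r
            else
              let wj := PySem.Str.split₀ (PySem.List.pyGetD phrases j "")
              if PySem.List.pyGetD wi (-1) "" = PySem.List.pyGetD wj 0 "" then
                PySem.Set.add r (PySem.List.pyGetD phrases i "" ++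
                  PySem.Str.slice (PySem.List.pyGetD phrases j "") (some ((PySem.Str.len (PySem.List.pyGetD wj 0 "") : Int))) none)
              else r) r)
      PySem.Set.empty
  PySem.List.sorted result (fun x => x) false

-- ===== PRECONDITION & SPEC =====
-- Pre_ excludes inputs containing a phrase with no words (empty or whitespace-only), on which the Python A raises IndexError.
def Pre_beforeAndAfterPuzzles (phrases : List String) : Prop :=
  ∀ s ∈ phrases, PySem.Str.split₀ s ≠ []
instance (phrases : List String) : Decidable (Pre_beforeAndAfterPuzzles phrases) := by
  unfold Pre_beforeAndAfterPuzzles; infer_instance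
def pvWitness_beforeAndAfterPuzzles : List String := ["a b", "b c"]

def Spec_beforeAndAfterPuzzles (phrases : List String) (out : List String) : Prop :=
  out = beforeAndAfterPuzzles_alt phrases
instance (phrases : List String) (out : List String) : Decidable (Spec_beforeAndAfterPuzzles phrases out) := by
  unfold Spec_beforeAndAfterPuzzles; infer_instance

-- ===== CLAIM (what is proved, stated in full; the proofs are below) =====
def Claim_equal_beforeAndAfterPuzzles : Prop :=
  ∀ (phrases : List String), Dom_beforeAndAfterPuzzles phrases →
    Pre_beforeAndAfterPuzzles phrases →
    Spec_beforeAndAfterPuzzles phrases (beforeAndAfterPuzzles phrases)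
-- ===== LEMMAS AND PROOFS =====

-- first / last word of a phrase (as A's and B's total ports compute them)
def pvFW (s : String) : String := PySem.List.pyGetD (PySem.Str.split₀ s) 0 ""
def pvLW (s : String) : String := PySem.List.pyGetD (PySem.Str.split₀ s) (-1) ""
-- the combined phrase built from the ordered pair (a, b)
def pvCombo (phrases : List String) (a b : Nat) : String :=
  phrases.getD a "" ++
    PySem.Str.slice (phrases.getD b "") (some ((PySem.Str.len (pvFW (phrases.getD b "")) : Int))) none
-- the set both ports build: all pvCombo a b with a ≠ b and lastword(a) = firstword(b)
def pvP (phrases : List String) (x : String) : Prop :=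
  ∃ a b : Nat, a < phrases.length ∧ b < phrases.length ∧ a ≠ b ∧
    pvLW (phrases.getD a "") = pvFW (phrases.getD b "") ∧ x = pvCombo phrases a b

theorem pv_mem_foldl_step {β : Type} (l : List β) (s : List String)
    (F : List String → β → List String) (Q : β → String → Prop)
    (h : ∀ r b x, x ∈ F r b ↔ x ∈ r ∨ Q b x) (x : String) :
    x ∈ l.foldl F s ↔ x ∈ s ∨ ∃ b ∈ l, Q b x := by
  induction l generalizing s with
  | nil => simp
  | cons hd tl ih =>
    rw [List.foldl_cons, ih, h]
    simp [or_assoc]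

theorem pv_nodup_foldl_step {β : Type} (l : List β) (s : List String)
    (F : List String → β → List String)
    (h : ∀ r b, r.Nodup → (F r b).Nodup) (hs : s.Nodup) : (l.foldl F s).Nodup := by
  induction l generalizing s with
  | nil => exact hs
  | cons hd tl ih => exact ih _ (h _ _ hs)

theorem pv_mem_foldl_addite {β : Type} (l : List β) (s : List String)
    (c : β → Prop) [DecidablePred c] (f : β → String) (x : String) :
    x ∈ l.foldl (fun r b => if c b then PySem.Set.add r (f b) else r) s ↔
      x ∈ s ∨ ∃ b ∈ l, c b ∧ x = f b := by
  refine pv_mem_foldl_step l s _ (fun b x => c b ∧ x = f b) ?_ x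
  intro r b x
  split_ifs with hc <;> simp [PySem.Set.mem_add, hc]

theorem pv_nodup_foldl_addite {β : Type} (l : List β) (s : List String)
    (c : β → Prop) [DecidablePred c] (f : β → String) (hs : s.Nodup) :
    (l.foldl (fun r b => if c b then PySem.Set.add r (f b) else r) s).Nodup := by
  refine pv_nodup_foldl_step l s _ ?_ hs
  intro r b hr
  split_ifs with hc
  · exact PySem.Set.nodup_add _ _ hr
  · exact hr

theorem pv_getD_group {β : Type} (l : List β) (d : PySem.Dict String (List Int))
    (key : β → String) (val : β → Int) (w : String) :
    PySem.Dict.getD (l.foldl (fun d p => PySem.Dict.modify d (key p) [] (fun t => t ++ [val p])) d) w []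
      = PySem.Dict.getD d w [] ++ (l.filter (fun p => key p == w)).map val := by
  induction l generalizing d with
  | nil => simp
  | cons hd tl ih =>
    rw [List.foldl_cons, ih, PySem.Dict.getD_modify]
    by_cases h : w = key hd
    · simp [h]
    · have hb : (key hd == w) = false := beq_eq_false_iff_ne.mpr (fun hh => h hh.symm)
      simp [h, hb]

theorem pv_sorted_ext (RA RB : List String) (hA : RA.Nodup) (hB : RB.Nodup) (h : ∀ x, x ∈ RA ↔ x ∈ RB) :
    PySem.List.sorted RA (fun x => x) false = PySem.List.sorted RB (fun x => x) false := by
  rw [PySem.List.sorted_id_eq_sorted_id_iff_perm]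
  exact (List.perm_ext_iff_of_nodup hA hB).mpr h

-- A-side per-phrase contribution (the two inner loops), as it appears after rewriting the maps
def pvQA (phrases : List String) (p : Int × String) (x : String) : Prop :=
  (∃ j ∈ List.map Prod.fst (List.filter (fun q : Int × String =>
        PySem.List.pyGetD (PySem.Str.split₀ q.2) (-1) "" == PySem.List.pyGetD (PySem.Str.split₀ p.2) 0 "")
        (PySem.List.enumerate phrases)),
      j ≠ p.1 ∧ x = PySem.List.pyGetD phrases j "" ++
        PySem.Str.slice p.2 (some ((PySem.Str.len (PySem.List.pyGetD (PySem.Str.split₀ p.2) 0 "") : Int))) none) ∨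
  (∃ k ∈ List.map Prod.fst (List.filter (fun q : Int × String =>
        PySem.List.pyGetD (PySem.Str.split₀ q.2) 0 "" == PySem.List.pyGetD (PySem.Str.split₀ p.2) (-1) "")
        (PySem.List.enumerate phrases)),
      k ≠ p.1 ∧ x = p.2 ++
        PySem.Str.slice (PySem.List.pyGetD phrases k "") (some ((PySem.Str.len (PySem.List.pyGetD (PySem.Str.split₀ p.2) (-1) "") : Int))) none)

-- B-side per-i contribution (the inner loop over j)
def pvQB (phrases : List String) (i : Int) (x : String) : Prop :=
  ∃ j ∈ PySem.List.pyRange 0 (phrases.length : Int) 1,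
    (¬ i = j) ∧ PySem.List.pyGetD (PySem.Str.split₀ (PySem.List.pyGetD phrases i "")) (-1) "" =
      PySem.List.pyGetD (PySem.Str.split₀ (PySem.List.pyGetD phrases j "")) 0 "" ∧
    x = PySem.List.pyGetD phrases i "" ++
      PySem.Str.slice (PySem.List.pyGetD phrases j "")
        (some ((PySem.Str.len (PySem.List.pyGetD (PySem.Str.split₀ (PySem.List.pyGetD phrases j "")) 0 "") : Int))) none

theorem pv_mem_idx (phrases : List String) (key : String → String) (w : String) (j : Int) :
    (j ∈ List.map Prod.fst (List.filter (fun q : Int × String => key q.2 == w) (PySem.List.enumerate phrases))) ↔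
    ∃ a : Nat, a < phrases.length ∧ j = (a : Int) ∧ key (phrases.getD a "") = w := by
  simp only [List.mem_map, List.mem_filter, PySem.List.mem_enumerate_iff]
  constructor
  · rintro ⟨q, ⟨⟨k, hk, rfl⟩, hcond⟩, rfl⟩
    refine ⟨k, hk, by simp, ?_⟩
    rw [List.getD_eq_getElem _ _ hk]
    simpa using hcond
  · rintro ⟨a, ha, rfl, hkey⟩
    refine ⟨((a : Int), phrases[a]), ⟨⟨a, ha, by simp⟩, ?_⟩, rfl⟩
    rw [List.getD_eq_getElem _ _ ha] at hkey
    simpa using hkey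

theorem pv_A_iff (phrases : List String) (x : String) :
    (∃ p ∈ PySem.List.enumerate phrases, pvQA phrases p x) ↔ pvP phrases x := by
  constructor
  · rintro ⟨p, hp, hQ⟩
    rw [PySem.List.mem_enumerate_iff] at hp
    obtain ⟨i, hi, rfl⟩ := hp
    rw [show phrases[i] = phrases.getD i "" from (List.getD_eq_getElem _ _ hi).symm] at hQ
    simp only [pvQA] at hQ
    rcases hQ with ⟨j, hj, hne, hx⟩ | ⟨k, hk, hne, hx⟩
    · rw [pv_mem_idx phrases (fun s => PySem.List.pyGetD (PySem.Str.split₀ s) (-1) "")] at hj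
      obtain ⟨a, ha, rfl, hkey⟩ := hj
      refine ⟨a, i, ha, hi, fun h => hne (by simp [h]), hkey, ?_⟩
      rw [hx]
      simp only [pvCombo, pvFW, PySem.List.pyGetD_natCast]
    · rw [pv_mem_idx phrases (fun s => PySem.List.pyGetD (PySem.Str.split₀ s) 0 "")] at hk
      obtain ⟨b, hb, rfl, hkey⟩ := hk
      refine ⟨i, b, hi, hb, fun h => hne (by simp [h]), hkey.symm, ?_⟩
      rw [hx]
      simp only [pvCombo, pvFW, PySem.List.pyGetD_natCast]
      rw [← hkey]
  · rintro ⟨a, b, ha, hb, hab, hkey, rfl⟩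
    refine ⟨((0 : Int) + (b : Int), phrases.getD b ""), ?_, ?_⟩
    · rw [PySem.List.mem_enumerate_iff]
      exact ⟨b, hb, by rw [List.getD_eq_getElem _ _ hb]⟩
    · simp only [pvQA]
      left
      refine ⟨(a : Int), ?_, fun h => hab (by omega), ?_⟩
      · rw [pv_mem_idx phrases (fun s => PySem.List.pyGetD (PySem.Str.split₀ s) (-1) "")]
        exact ⟨a, ha, rfl, hkey⟩
      · simp only [pvCombo, pvFW, PySem.List.pyGetD_natCast]

theorem pv_B_iff (phrases : List String) (x : String) :
    (∃ i ∈ PySem.List.pyRange 0 (phrases.length : Int) 1, pvQB phrases i x) ↔ pvP phrases x := by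
  constructor
  · rintro ⟨i, hi, j, hj, hne, hkey, rfl⟩
    rw [PySem.List.mem_pyRange_one] at hi hj
    obtain ⟨a, rfl⟩ : ∃ a : Nat, (a : Int) = i := ⟨i.toNat, Int.toNat_of_nonneg hi.1⟩
    obtain ⟨b, rfl⟩ : ∃ b : Nat, (b : Int) = j := ⟨j.toNat, Int.toNat_of_nonneg hj.1⟩
    simp only [PySem.List.pyGetD_natCast] at hkey ⊢
    exact ⟨a, b, by omega, by omega, by omega, hkey, by
      simp only [pvCombo, pvFW]⟩
  · rintro ⟨a, b, ha, hb, hab, hkey, rfl⟩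
    refine ⟨(a : Int), by rw [PySem.List.mem_pyRange_one]; omega,
            (b : Int), by rw [PySem.List.mem_pyRange_one]; omega,
            fun h => hab (by omega), ?_, ?_⟩
    · simpa only [PySem.List.pyGetD_natCast] using hkey
    · simp only [pvCombo, pvFW, PySem.List.pyGetD_natCast]

-- ===== VERDICT (by name: the statement is the Claim_ definition above) =====
theorem beforeAndAfterPuzzles_spec : Claim_equal_beforeAndAfterPuzzles := by
  intro phrases _ _
  unfold Spec_beforeAndAfterPuzzles beforeAndAfterPuzzles beforeAndAfterPuzzles_alt
  simp only []
  rw [PySem.List.foldl_prod_mk (f := fun (d : PySem.Dict String (List Int)) (p : Int × String) =>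
        PySem.Dict.modify d (PySem.List.pyGetD (PySem.Str.split₀ p.2) 0 "") [] (fun l => l ++ [p.1]))
      (g := fun (d : PySem.Dict String (List Int)) (p : Int × String) =>
        PySem.Dict.modify d (PySem.List.pyGetD (PySem.Str.split₀ p.2) (-1) "") [] (fun l => l ++ [p.1]))]
  simp only [pv_getD_group]
  have hemp : ∀ w : String, PySem.Dict.getD (PySem.Dict.empty : PySem.Dict String (List Int)) w [] = [] :=
    fun _ => rfl
  simp only [hemp, List.nil_append]
  apply pv_sorted_ext
  · refine pv_nodup_foldl_step _ _ _ ?_ List.nodup_nil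
    intro r p hr
    exact pv_nodup_foldl_addite _ _ _ _ (pv_nodup_foldl_addite _ _ _ _ hr)
  · refine pv_nodup_foldl_step _ _ _ ?_ List.nodup_nil
    intro r i hr
    refine pv_nodup_foldl_step _ _ _ ?_ hr
    intro r' j hr'
    split_ifs with h1 h2
    · exact hr'
    · exact PySem.Set.nodup_add _ _ hr'
    · exact hr'
  · intro x
    rw [pv_mem_foldl_step _ _ _ (pvQA phrases) ?stepA x,
        pv_mem_foldl_step _ _ _ (pvQB phrases) ?stepB x]
    case stepA =>
      intro r p y
      rw [pv_mem_foldl_addite, pv_mem_foldl_addite]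
      simp only [pvQA]
      exact or_assoc
    case stepB =>
      intro r i y
      rw [pv_mem_foldl_step _ _ _ (fun j z => (¬ i = j) ∧
            PySem.List.pyGetD (PySem.Str.split₀ (PySem.List.pyGetD phrases i "")) (-1) "" =
              PySem.List.pyGetD (PySem.Str.split₀ (PySem.List.pyGetD phrases j "")) 0 "" ∧
            z = PySem.List.pyGetD phrases i "" ++
              PySem.Str.slice (PySem.List.pyGetD phrases j "")
                (some ((PySem.Str.len (PySem.List.pyGetD (PySem.Str.split₀ (PySem.List.pyGetD phrases j "")) 0 "") : Int))) none) ?_ y]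
      · simp only [pvQB]
      · intro r' j z
        split_ifs with h1 h2
        · exact (or_iff_left (fun h => h.1 h1)).symm
        · rw [PySem.Set.mem_add]
          exact or_congr_right ⟨fun h => ⟨h1, h2, h⟩, fun h => h.2.2⟩
        · exact (or_iff_left (fun h => h2 h.2.1)).symm
    rw [show (PySem.Set.empty : PySem.Set String) = ([] : List String) from rfl]
    simp only [List.not_mem_nil, false_or]
    rw [pv_A_iff, pv_B_iff]
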